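-- pv_equiv track=rewrite | github.com/hegroiva/handleKorp | HandleKorp.py | isValidSentence
-- ===== SOURCE A (Python) =====
-- def isValidSentence(sentence):
--     """
--     Helper function to use with selectRandomSentences
--     Checks for a certain amount of consecutive short or long words within a sentence
--     The idea was to discard sentences with mostly empty words (OCR faults)
--     Obsolete, if using good OCR results (=modern corpora) or Korp sentences are tagged
--     """
--     words = sentence.split("\n")
--     if len(words) <= 3:
--         return False
--     else:
--         consecutiveOne = 0
--         consecutiveTwo = 0
--         stringi = ""
--         for word in words:
--             if len(word) == 8:
--                 consecutiveTwo += 1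
--                 consecutiveOne += 1
--                 stringi += word
--             elif len(word) <= 7:
--                 consecutiveOne += 1
--                 consecutiveTwo = 0
--                 stringi += word
--             else:
--                 if consecutiveOne >= 4 or consecutiveTwo >= 6:
--                     return False
--                 else:
--                     consecutiveOne = 0
--                     consecutiveTwo = 0
--                     stringi = ""
--
--         # check for consecutive non-vowels & non-nouns?
--
--     return True
-- ===== SOURCE B (Python) =====
-- def isValidSentence(sentence):
--     words = sentence.split("\n")
--     if len(words) <= 3:
--         return False
--     # run-length encode consecutive short (len <= 8) / long (len >= 9) words
--     runs = []
--     for word in words: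
--         short = len(word) <= 8
--         if runs and runs[-1][0] == short:
--             runs[-1][1] += 1
--         else:
--             runs.append([short, 1])
--     # a run of >= 4 short words followed by a long word invalidates the sentence;
--     # the final run is never checked
--     for short, count in runs[:-1]:
--         if short and count >= 4:
--             return False
--     return True
-- ===== Notes on version B (the rewrite author's own statement) =====
-- stated objective: simpler
-- what changed: B materializes the run-length encoding of consecutive short/long words with one pass and then checks every non-final short run for length >= 4, replacing A's two interleaved counters (the consecutiveTwo>=6 test is redundant) and the dead string accumulator.
import Mathlib
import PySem

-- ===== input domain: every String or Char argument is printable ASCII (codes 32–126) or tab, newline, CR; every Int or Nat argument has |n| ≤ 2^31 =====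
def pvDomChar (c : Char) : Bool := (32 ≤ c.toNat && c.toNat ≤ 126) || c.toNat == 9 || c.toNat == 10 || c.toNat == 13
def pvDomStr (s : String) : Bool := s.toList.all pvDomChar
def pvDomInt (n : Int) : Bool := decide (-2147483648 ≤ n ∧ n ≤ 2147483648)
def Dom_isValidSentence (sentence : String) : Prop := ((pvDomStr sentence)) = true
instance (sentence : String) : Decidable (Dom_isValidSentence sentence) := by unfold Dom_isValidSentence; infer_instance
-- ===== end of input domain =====

-- B replaces A's two interleaved counters and dead string accumulator by an explicit
-- run-length encoding of short/long words checked on all non-final runs (objective: simpler).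


-- ===== PORT A =====
-- the for-loop of A with its state (consecutiveOne, consecutiveTwo, stringi); early `return False` = result false
def pvLoopA : List String → Int → Int → String → Bool
  | [], _, _, _ => true
  | word :: ws, c1, c2, stringi =>
    if PySem.Str.len word = 8 then pvLoopA ws (c1 + 1) (c2 + 1) (stringi ++ word)
    else if PySem.Str.len word ≤ 7 then pvLoopA ws (c1 + 1) 0 (stringi ++ word)
    else if c1 ≥ 4 ∨ c2 ≥ 6 then false
    else pvLoopA ws 0 0 ""

-- sentence.split("\n"): the separator is the nonempty literal "\n", so split? is always some
def isValidSentence (sentence : String) : Bool :=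
  let words := (PySem.Str.split? sentence "\n").getD []
  if PySem.List.len words ≤ 3 then false
  else pvLoopA words 0 0 ""

-- ===== PORT B =====
-- one step of B's run-building loop (mutating runs[-1][1] += 1 = replace the last pair)
def pvStepB (runs : List (Bool × Int)) (word : String) : List (Bool × Int) :=
  let short : Bool := decide (PySem.Str.len word ≤ 8)
  match runs.getLast? with
  | some (b, c) => if b == short then runs.dropLast ++ [(b, c + 1)] else runs ++ [(short, 1)]
  | none => [(short, 1)]

-- B's second loop over runs[:-1]
def pvChk : List (Bool × Int) → Bool
  | [] => true
  | (short, count) :: rest => if short = true ∧ 4 ≤ count then false else pvChk rest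

def isValidSentence_alt (sentence : String) : Bool :=
  let words := (PySem.Str.split? sentence "\n").getD []
  if PySem.List.len words ≤ 3 then false
  else
    let runs := words.foldl pvStepB []
    pvChk runs.dropLast  -- runs[:-1] : dropLast is exact for this slice

-- ===== PRECONDITION & SPEC =====
def Spec_isValidSentence (sentence : String) (out : Bool) : Prop := out = isValidSentence_alt sentence
instance (sentence : String) (out : Bool) : Decidable (Spec_isValidSentence sentence out) := by unfold Spec_isValidSentence; infer_instance

-- ===== CLAIM (what is proved, stated in full; the proofs are below) =====
def Claim_equal_isValidSentence : Prop := ∀ (sentence : String), Dom_isValidSentence sentence → Spec_isValidSentence sentence (isValidSentence sentence)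

-- ===== LEMMAS AND PROOFS =====

-- simplified semantics shared by both proofs: c = current count of consecutive short (len ≤ 8) words
def pvG : List String → Int → Bool
  | [], _ => true
  | w :: ws, c =>
    if PySem.Str.len w ≤ 8 then pvG ws (c + 1)
    else if c ≥ 4 then false else pvG ws 0

-- A's loop: consecutiveTwo ≤ consecutiveOne always, so the `c2 ≥ 6` test is redundant and stringi is dead
theorem pvLoopA_eq_pvG (ws : List String) : ∀ (c1 c2 : Int) (s : String),
    0 ≤ c2 → c2 ≤ c1 → pvLoopA ws c1 c2 s = pvG ws c1 := by
  induction ws with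
  | nil => intros; rfl
  | cons w ws ih =>
    intro c1 c2 s h0 h1
    unfold pvLoopA pvG
    by_cases h8 : PySem.Str.len w = 8
    · rw [if_pos h8, if_pos (show PySem.Str.len w ≤ 8 by omega)]
      exact ih _ _ _ (by omega) (by omega)
    · rw [if_neg h8]
      by_cases h7 : PySem.Str.len w ≤ 7
      · rw [if_pos h7, if_pos (show PySem.Str.len w ≤ 8 by omega)]
        exact ih _ _ _ (by omega) (by omega)
      · rw [if_neg h7, if_neg (show ¬ PySem.Str.len w ≤ 8 by omega)]
        by_cases hc : c1 ≥ 4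
        · rw [if_pos (Or.inl hc), if_pos hc]
        · rw [if_neg (show ¬ (c1 ≥ 4 ∨ c2 ≥ 6) by omega), if_neg hc]
          exact ih _ _ _ le_rfl le_rfl

theorem pvStepB_ne_nil (runs : List (Bool × Int)) (w : String) : pvStepB runs w ≠ [] := by
  unfold pvStepB
  cases h : runs.getLast? with
  | none => simp
  | some p =>
    obtain ⟨b, c⟩ := p
    dsimp only
    split <;> simp

-- frame rule: the run-building fold only touches the last group
theorem pvFoldB_frame (ws : List String) : ∀ (R rest : List (Bool × Int)), rest ≠ [] →
    List.foldl pvStepB (R ++ rest) ws = R ++ List.foldl pvStepB rest ws := by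
  induction ws with
  | nil => intros; rfl
  | cons w ws ih =>
    intro R rest hne
    obtain ⟨rs, p, hrest⟩ := (List.eq_nil_or_concat rest).resolve_left hne
    obtain ⟨b, c⟩ := p
    rw [List.concat_eq_append] at hrest
    subst hrest
    have hstep : pvStepB (R ++ (rs ++ [(b, c)])) w = R ++ pvStepB (rs ++ [(b, c)]) w := by
      unfold pvStepB
      rw [← List.append_assoc]
      rw [show ((R ++ rs) ++ [(b, c)]).getLast? = some (b, c) from by simp,
          show (rs ++ [(b, c)]).getLast? = some (b, c) from by simp]
      dsimp only
      rw [List.dropLast_concat, List.dropLast_concat]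
      split <;> simp [List.append_assoc]
    simp only [List.foldl_cons, hstep]
    exact ih R _ (pvStepB_ne_nil _ w)

theorem pvFoldB_ne_nil (ws : List String) : ∀ (rest : List (Bool × Int)), rest ≠ [] →
    List.foldl pvStepB rest ws ≠ [] := by
  induction ws with
  | nil => intro rest h; simpa using h
  | cons w ws ih => intro rest h; exact ih _ (pvStepB_ne_nil rest w)

-- the fold on a single current group, unfolded one word
theorem pvFoldB_single (ws : List String) (w : String) (b : Bool) (c : Int) :
    List.foldl pvStepB [(b, c)] (w :: ws) =
      if decide (PySem.Str.len w ≤ 8) = b then List.foldl pvStepB [(b, c + 1)] ws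
      else (b, c) :: List.foldl pvStepB [(decide (PySem.Str.len w ≤ 8), 1)] ws := by
  have hstep : pvStepB [(b, c)] w =
      if decide (PySem.Str.len w ≤ 8) = b then [(b, c + 1)]
      else [(b, c), (decide (PySem.Str.len w ≤ 8), 1)] := by
    unfold pvStepB
    dsimp only [List.getLast?_singleton]
    by_cases hb : decide (PySem.Str.len w ≤ 8) = b
    · rw [if_pos (beq_iff_eq.mpr hb.symm), if_pos hb]
      rfl
    · rw [if_neg (fun h => hb (beq_iff_eq.mp h).symm), if_neg hb]
      rfl
  rw [List.foldl_cons, hstep]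
  by_cases hb : decide (PySem.Str.len w ≤ 8) = b
  · rw [if_pos hb, if_pos hb]
  · rw [if_neg hb, if_neg hb]
    exact pvFoldB_frame ws [(b, c)] _ (by simp)

-- B's two loops fused: current group (b, c), final group never checked
def pvH : List String → Bool → Int → Bool
  | [], _, _ => true
  | w :: ws, b, c =>
    if decide (PySem.Str.len w ≤ 8) = b then pvH ws b (c + 1)
    else if b = true ∧ 4 ≤ c then false
    else pvH ws (decide (PySem.Str.len w ≤ 8)) 1

theorem pvChk_foldB (ws : List String) : ∀ (b : Bool) (c : Int),
    pvChk (List.foldl pvStepB [(b, c)] ws).dropLast = pvH ws b c := by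
  induction ws with
  | nil => intros; rfl
  | cons w ws ih =>
    intro b c
    rw [pvFoldB_single]
    unfold pvH
    by_cases hb : decide (PySem.Str.len w ≤ 8) = b
    · rw [if_pos hb, if_pos hb]
      exact ih b (c + 1)
    · rw [if_neg hb, if_neg hb]
      have hne := pvFoldB_ne_nil ws [(decide (PySem.Str.len w ≤ 8), 1)] (by simp)
      rw [List.dropLast_cons_of_ne_nil hne]
      unfold pvChk
      by_cases hc : b = true ∧ 4 ≤ c
      · rw [if_pos hc, if_pos hc]
      · rw [if_neg hc, if_neg hc]
        exact ih _ 1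

theorem pvH_eq_pvG (ws : List String) : ∀ (b : Bool) (c : Int),
    pvH ws b c = pvG ws (if b then c else 0) := by
  induction ws with
  | nil => intros; rfl
  | cons w ws ih =>
    intro b c
    unfold pvH pvG
    by_cases h8 : PySem.Str.len w ≤ 8
    · rw [if_pos h8]
      cases b with
      | true =>
        rw [if_pos (decide_eq_true h8), ih, if_pos rfl, if_pos rfl]
      | false =>
        rw [if_neg (by rw [decide_eq_true h8]; exact fun h => absurd h.symm (by simp)),
            if_neg (fun h => absurd h.1 (by simp)), decide_eq_true h8, ih,
            if_pos rfl, if_neg (by simp)]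
        norm_num
    · rw [if_neg h8]
      cases b with
      | true =>
        rw [if_neg (by rw [decide_eq_false h8]; exact fun h => absurd h (by simp)), if_pos rfl]
        by_cases hc : (4 : Int) ≤ c
        · rw [if_pos ⟨rfl, hc⟩, if_pos (by omega)]
        · rw [if_neg (fun h => hc h.2), if_neg (by omega), ih, decide_eq_false h8, if_neg (by simp)]
      | false =>
        rw [if_pos (by rw [decide_eq_false h8]), ih,
            if_neg (by simp), if_neg (by simp)]

-- A's pvG on the first word, with B's initial group on the right
theorem pvG_cons_zero (w : String) (ws : List String) :
    pvG (w :: ws) 0 = pvG ws (if decide (PySem.Str.len w ≤ 8) then 1 else 0) := by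
  show (if PySem.Str.len w ≤ 8 then pvG ws (0 + 1) else if (0 : Int) ≥ 4 then false else pvG ws 0)
      = pvG ws (if decide (PySem.Str.len w ≤ 8) then 1 else 0)
  by_cases h8 : PySem.Str.len w ≤ 8
  · rw [if_pos h8, decide_eq_true h8, if_pos rfl, zero_add]
  · rw [if_neg h8, if_neg (by omega), decide_eq_false h8, if_neg (by simp)]

-- ===== VERDICT (by name: the statement is the Claim_ definition above) =====
theorem isValidSentence_spec : Claim_equal_isValidSentence := by
  intro sentence _
  unfold Spec_isValidSentence isValidSentence isValidSentence_alt
  dsimp only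
  generalize (PySem.Str.split? sentence "\n").getD [] = words
  by_cases h3 : PySem.List.len words ≤ 3
  · rw [if_pos h3, if_pos h3]
  · rw [if_neg h3, if_neg h3]
    cases words with
    | nil => exact absurd (by rw [PySem.List.len_eq]; norm_num) h3
    | cons w ws =>
      rw [pvLoopA_eq_pvG _ 0 0 "" le_rfl le_rfl]
      have hfold : List.foldl pvStepB [] (w :: ws) =
          List.foldl pvStepB [(decide (PySem.Str.len w ≤ 8), 1)] ws := by
        rw [List.foldl_cons]; rfl
      rw [hfold, pvChk_foldB, pvH_eq_pvG, pvG_cons_zero]
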